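-- pv_equiv track=rewrite | github.com/zbxzc35/Kayak | kayak/matrix_ops.py | axes_for_sum
-- ===== SOURCE A (Python) =====
-- def axes_for_sum(mat_shape, outgrad_shape):
--     mat_shape = list(mat_shape)
--     outgrad_shape = list(outgrad_shape)
--     to_sum = []
--     for dim, sz in enumerate(outgrad_shape[::-1]):
--         if len(mat_shape) == 0:
--             to_sum.append(len(outgrad_shape)-dim-1)
--         elif mat_shape.pop() == 1:
--             to_sum.append(len(outgrad_shape)-dim-1)
--     return tuple(to_sum[::-1])
-- ===== SOURCE B (Python) =====
-- def axes_for_sum(mat_shape, outgrad_shape):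
--     mat_shape = tuple(mat_shape)
--     outgrad_shape = tuple(outgrad_shape)
--     offset = len(outgrad_shape) - len(mat_shape)
--     return tuple(i for i in range(len(outgrad_shape))
--                  if i < offset or mat_shape[i - offset] == 1)
-- ===== Notes on version B (the rewrite author's own statement) =====
-- stated objective: simpler
-- what changed: Replaced the reversed iteration that destructively pops mat_shape and the final reversal of the accumulated list by a single forward filter over range(len(outgrad_shape)) using the computed length offset.
import Mathlib
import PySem

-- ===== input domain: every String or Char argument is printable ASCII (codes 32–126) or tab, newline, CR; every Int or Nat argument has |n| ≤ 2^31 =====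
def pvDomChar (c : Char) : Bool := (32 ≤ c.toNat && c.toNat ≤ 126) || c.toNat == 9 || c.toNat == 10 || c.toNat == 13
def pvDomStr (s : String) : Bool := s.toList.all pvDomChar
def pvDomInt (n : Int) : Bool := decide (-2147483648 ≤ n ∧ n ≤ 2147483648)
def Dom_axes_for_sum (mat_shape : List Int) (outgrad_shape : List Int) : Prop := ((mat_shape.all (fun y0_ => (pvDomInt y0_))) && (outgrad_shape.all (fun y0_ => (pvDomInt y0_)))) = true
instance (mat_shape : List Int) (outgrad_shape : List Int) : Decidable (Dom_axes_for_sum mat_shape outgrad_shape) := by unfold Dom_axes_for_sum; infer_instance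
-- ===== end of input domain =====

-- B replaces A's reversed loop with pops and a final reversal by one forward filter using a length offset (simpler).

-- ===== PORT A =====
-- one loop step of A: state is (remaining mat_shape, to_sum); p = (dim, sz)
def axesStepA (n : Int) (st : List Int × List Int) (p : Int × Int) : List Int × List Int :=
  if st.1.length = 0 then (st.1, st.2 ++ [n - p.1 - 1])
  else
    match PySem.List.pop? st.1 (-1) with
    | some (v, rest) => if v = 1 then (rest, st.2 ++ [n - p.1 - 1]) else (rest, st.2)
    | none => (st.1, st.2)   -- unreachable: st.1 nonempty here

def axes_for_sum (mat_shape : List Int) (outgrad_shape : List Int) : List Int :=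
  let n : Int := (outgrad_shape.length : Int)
  let rev := (PySem.List.slice? outgrad_shape none none (-1)).getD []   -- outgrad_shape[::-1]
  let res := (PySem.List.enumerate rev).foldl (axesStepA n) (mat_shape, [])
  (PySem.List.slice? res.2 none none (-1)).getD []                       -- to_sum[::-1]

-- ===== PORT B =====
def axes_for_sum_alt (mat_shape : List Int) (outgrad_shape : List Int) : List Int :=
  let offset : Int := (outgrad_shape.length : Int) - (mat_shape.length : Int)
  -- mat_shape[i - offset]: the index is always in range when i ≥ offset, so pyGet? is exact here
  (PySem.List.pyRange 0 (outgrad_shape.length : Int) 1).filter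
    (fun i => decide (i < offset) || (PySem.List.pyGet? mat_shape (i - offset) == some 1))

-- ===== PRECONDITION & SPEC =====
def Spec_axes_for_sum (mat_shape : List Int) (outgrad_shape : List Int) (out : List Int) : Prop := out = axes_for_sum_alt mat_shape outgrad_shape
instance (mat_shape : List Int) (outgrad_shape : List Int) (out : List Int) : Decidable (Spec_axes_for_sum mat_shape outgrad_shape out) := by unfold Spec_axes_for_sum; infer_instance

-- ===== CLAIM (what is proved, stated in full; the proofs are below) =====
def Claim_equal_axes_for_sum : Prop := ∀ (mat_shape : List Int) (outgrad_shape : List Int), Dom_axes_for_sum mat_shape outgrad_shape → Spec_axes_for_sum mat_shape outgrad_shape (axes_for_sum mat_shape outgrad_shape)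

-- ===== LEMMAS AND PROOFS =====

-- closed characterisation of A's loop body, over the REVERSED remaining mat (pops become head-drops)
def bodyA (n : Int) : List Int → Int → Nat → List Int
  | _, _, 0 => []
  | [], k, t+1 => (n - k - 1) :: bodyA n [] (k+1) t
  | v :: r, k, t+1 => if v = 1 then (n - k - 1) :: bodyA n r (k+1) t else bodyA n r (k+1) t

theorem enumerate_snd_foldl (n : Int) : ∀ (L : List Int) (k : Int) (rmat acc : List Int),
    ((PySem.List.enumerate L k).foldl (axesStepA n) (rmat.reverse, acc)).2
      = acc ++ bodyA n rmat k L.length := by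
  intro L
  induction L with
  | nil =>
    intro k rmat acc
    simp [PySem.List.enumerate, bodyA]
  | cons x L ih =>
    intro k rmat acc
    rw [PySem.List.enumerate_cons, List.foldl_cons]
    cases rmat with
    | nil =>
      have hstep : axesStepA n (([] : List Int).reverse, acc) (k, x)
          = (([] : List Int).reverse, acc ++ [n - k - 1]) := by
        simp [axesStepA]
      rw [hstep, ih (k+1) [] (acc ++ [n - k - 1])]
      simp [bodyA]
    | cons v r =>
      have hstep : axesStepA n ((v :: r).reverse, acc) (k, x)
          = (r.reverse, if v = 1 then acc ++ [n - k - 1] else acc) := by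
        simp only [axesStepA, List.reverse_cons, PySem.List.pop?_last]
        split_ifs with h0 hv <;> simp_all
      rw [hstep]
      by_cases hv : v = 1
      · simp only [hv, if_true] at *
        rw [ih (k+1) r (acc ++ [n - k - 1])]
        simp [bodyA]
      · simp only [if_neg hv]
        rw [ih (k+1) r acc]
        simp [bodyA, hv]

theorem bodyA_reverse (n : Int) : ∀ (t : Nat) (rmat : List Int) (k : Int),
    (bodyA n rmat k t).reverse
      = (PySem.List.pyRange (n - k - t) (n - k) 1).filter
          (fun i => decide (i < n - k - rmat.length) || (PySem.List.pyGet? rmat (n - 1 - k - i) == some 1)) := by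
  intro t
  induction t with
  | zero =>
    intro rmat k
    have h0 : PySem.List.pyRange (n - k) (n - k) 1 = [] :=
      PySem.List.pyRange_one_eq_nil (le_refl _)
    simp [bodyA, h0]
  | succ t ih =>
    intro rmat k
    have hsplit : PySem.List.pyRange (n - k - ((t+1:Nat):Int)) (n - k) 1
        = PySem.List.pyRange (n - (k+1) - ((t:Nat):Int)) (n - (k+1)) 1 ++ [n - k - 1] := by
      have h := PySem.List.pyRange_one_succ_right (a := n - (k+1) - ((t:Nat):Int)) (b := n - k - 1)
        (by omega)
      rw [show n - k - ((t+1:Nat):Int) = n - (k+1) - ((t:Nat):Int) from by push_cast; ring,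
          show n - k = n - k - 1 + 1 from by ring, h]
      rw [show n - k - 1 + 1 - 1 = n - k - 1 from by ring, show n - (k+1) = n - k - 1 from by ring]
    rw [hsplit, List.filter_append]
    cases rmat with
    | nil =>
      have hb : bodyA n [] k (t+1) = (n - k - 1) :: bodyA n [] (k+1) t := rfl
      rw [hb, List.reverse_cons, ih [] (k+1)]
      congr 1
      · apply List.filter_congr
        intro i hi
        rw [PySem.List.mem_pyRange_one] at hi
        have d1 : i < n - (k+1) := by omega
        have d2 : i < n - k := by omega
        simp [d1, d2]
      · have d3 : (n - k - 1) < n - k := by omega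
        simp [d3]
    | cons v r =>
      have hz : n - 1 - k - (n - k - 1) = (0:Int) := by ring
      have htail : List.filter
          (fun i => decide (i < n - k - ((v :: r).length : Int)) || (PySem.List.pyGet? (v :: r) (n - 1 - k - i) == some 1))
          (PySem.List.pyRange (n - (k+1) - ((t:Nat):Int)) (n - (k+1)) 1)
          = (bodyA n r (k+1) t).reverse := by
        rw [ih r (k+1)]
        apply List.filter_congr
        intro i hi
        rw [PySem.List.mem_pyRange_one] at hi
        have e3 : (i < n - k - ((v :: r).length : Int)) ↔ (i < n - (k+1) - ((r.length : Int))) := by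
          simp; omega
        have e4 : n - 1 - k - i = (((n - 2 - k - i).toNat : Int)) + 1 := by omega
        have e5 : n - 1 - (k+1) - i = (((n - 2 - k - i).toNat : Int)) := by omega
        rw [e4, PySem.List.pyGet?_cons_succ, ← e5]
        congr 1
        exact decide_eq_decide.mpr e3
      have hhead : List.filter
          (fun i => decide (i < n - k - ((v :: r).length : Int)) || (PySem.List.pyGet? (v :: r) (n - 1 - k - i) == some 1))
          [n - k - 1] = if v = 1 then [n - k - 1] else [] := by
        have hg : PySem.List.pyGet? (v :: r) (n - 1 - k - (n - k - 1)) = some v := by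
          rw [hz]; exact PySem.List.pyGet?_zero_cons v r
        by_cases hv : v = 1
        · subst hv
          rw [if_pos rfl]
          simp [List.filter, hg]
        · rw [if_neg hv]
          simp [List.filter, hg, show ¬ ((r.length:Int) < 0) from by omega]
          rw [show (v == 1) = false from by simpa using hv]
      by_cases hv : v = 1
      · have hb : bodyA n (v :: r) k (t+1) = (n - k - 1) :: bodyA n r (k+1) t := by
          simp [bodyA, hv]
        rw [hb, List.reverse_cons, htail, hhead, if_pos hv]
      · have hb : bodyA n (v :: r) k (t+1) = bodyA n r (k+1) t := by
          simp [bodyA, hv]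
        rw [hb, htail, hhead, if_neg hv]
        simp

theorem axes_for_sum_spec' (mat_shape : List Int) (outgrad_shape : List Int) :
    axes_for_sum mat_shape outgrad_shape = axes_for_sum_alt mat_shape outgrad_shape := by
  unfold axes_for_sum axes_for_sum_alt
  simp only [PySem.List.slice?_none_none_neg_one, Option.getD_some]
  have h1 := enumerate_snd_foldl ((outgrad_shape.length : Int)) outgrad_shape.reverse 0
      mat_shape.reverse []
  rw [List.reverse_reverse, List.nil_append, List.length_reverse] at h1
  rw [h1, bodyA_reverse]
  rw [show (outgrad_shape.length : Int) - 0 - (outgrad_shape.length : Int) = 0 from by ring,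
      show (outgrad_shape.length : Int) - 0 = (outgrad_shape.length : Int) from by ring]
  apply List.filter_congr
  intro i hi
  rw [PySem.List.mem_pyRange_one] at hi
  simp only [List.length_reverse]
  by_cases hc : i < (outgrad_shape.length : Int) - (mat_shape.length : Int)
  · simp [hc]
  · have hge : (outgrad_shape.length : Int) - (mat_shape.length : Int) ≤ i := by omega
    have hj : (outgrad_shape.length : Int) - 1 - 0 - i
        = (((outgrad_shape.length : Int) - 1 - i).toNat : Int) := by omega
    have hjlt : ((outgrad_shape.length : Int) - 1 - i).toNat < mat_shape.length := by omega
    have hget : PySem.List.pyGet? mat_shape.reverse ((outgrad_shape.length : Int) - 1 - 0 - i)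
        = PySem.List.pyGet? mat_shape (i - ((outgrad_shape.length : Int) - (mat_shape.length : Int))) := by
      have h2 : PySem.List.pyGet? mat_shape
            (i - ((outgrad_shape.length : Int) - (mat_shape.length : Int)))
          = mat_shape[(i - ((outgrad_shape.length : Int) - (mat_shape.length : Int))).toNat]? :=
        PySem.List.pyGet?_of_nonneg _ (by omega)
      rw [hj, PySem.List.pyGet?_natCast, List.getElem?_reverse hjlt, h2]
      congr 1
      omega
    rw [hget]

-- ===== VERDICT (by name: the statement is the Claim_ definition above) =====
theorem axes_for_sum_spec : Claim_equal_axes_for_sum := by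
  intro mat og _
  exact axes_for_sum_spec' mat og
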